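-- pv_equiv track=rewrite | github.com/Pranov123/Crptyo_CIA_UPS | august.py | extract_hash
-- ===== SOURCE A (Python) =====
-- def extract_hash(text, key):
--     r = (len(key) % 3) + 2
--
--     original = ""
--     extracted_hash = ""
--
--     i = 0
--     while i < len(text):
--         # take r original chars
--         for _ in range(r):
--             if i < len(text):
--                 original += text[i]
--                 i += 1
--
--         # next char is hash
--         if i < len(text):
--             extracted_hash += text[i]
--             i += 1
--
--     return original, extracted_hash
-- ===== SOURCE B (Python) =====
-- def extract_hash(text, key):
--     r = (len(key) % 3) + 2
--     block = r + 1
--     original = []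
--     extracted = []
--     for i in range(0, len(text), block):
--         chunk = text[i:i+block]
--         original.append(chunk[:r])
--         extracted.append(chunk[r:])
--     return ''.join(original), ''.join(extracted)
-- ===== Notes on version B (the rewrite author's own statement) =====
-- stated objective: idiomatic
-- what changed: Replaces A's character-by-character while loop with nested counting for-loop and string += by a single for over block start indices with slicing (chunk[:r] and chunk[r:]) joined at the end.
import Mathlib
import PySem

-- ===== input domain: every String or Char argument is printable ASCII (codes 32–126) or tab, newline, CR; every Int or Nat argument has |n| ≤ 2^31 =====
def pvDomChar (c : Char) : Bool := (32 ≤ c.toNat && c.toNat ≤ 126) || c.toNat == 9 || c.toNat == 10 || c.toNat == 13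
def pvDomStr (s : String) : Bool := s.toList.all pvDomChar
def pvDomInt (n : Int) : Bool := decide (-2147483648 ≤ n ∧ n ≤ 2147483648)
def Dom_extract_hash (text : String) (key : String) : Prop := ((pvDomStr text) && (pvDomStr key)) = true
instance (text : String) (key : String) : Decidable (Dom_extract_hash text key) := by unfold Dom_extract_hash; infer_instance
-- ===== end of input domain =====

-- B replaces A's character-counting while loop (nested guarded for) by one pass over block
-- start indices with slicing; same O(n) cost, plainer decomposition (objective: idiomatic).


-- ===== PORT A =====
-- inner 'for _ in range(r): if i < len(text): original += text[i]; i += 1':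
-- returns (chars taken, remaining suffix)
def pvInnerA : Nat → List Char → List Char × List Char
  | 0, cs => ([], cs)
  | _ + 1, [] => ([], [])
  | n + 1, c :: cs =>
    let p := pvInnerA n cs
    (c :: p.1, p.2)

-- needed by pvLoopA's termination proof
theorem pvInnerA_snd_length (n : Nat) (cs : List Char) : (pvInnerA n cs).2.length ≤ cs.length := by
  induction n generalizing cs with
  | zero => simp [pvInnerA]
  | succ n ih =>
    cases cs with
    | nil => simp [pvInnerA]
    | cons c cs => simpa [pvInnerA] using Nat.le_succ_of_le (ih cs)

-- 'while i < len(text):' — take r chars, then one hash char if any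
def pvLoopA (r : Nat) : List Char → List Char × List Char
  | [] => ([], [])
  | c :: cs =>
    let p := pvInnerA r (c :: cs)
    match h2 : p.2 with
    | [] => (p.1, [])
    | hc :: t =>
      let q := pvLoopA r t
      (p.1 ++ q.1, hc :: q.2)
termination_by cs => cs.length
decreasing_by
  have hle := pvInnerA_snd_length r (c :: cs)
  rw [h2] at hle
  simp at hle ⊢
  omega

def extract_hash (text : String) (key : String) : String × String :=
  let r := key.length % 3 + 2
  let p := pvLoopA r text.toList
  (String.mk p.1, String.mk p.2)

-- ===== PORT B =====
def extract_hash_alt (text : String) (key : String) : String × String :=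
  let r : Nat := key.length % 3 + 2
  let block : Int := (r : Int) + 1
  let cs := text.toList
  let p := (PySem.List.pyRange 0 (cs.length : Int) block).foldl
    (fun (acc : List (List Char) × List (List Char)) i =>
      let chunk := PySem.List.slice cs (some i) (some (i + block))
      (acc.1 ++ [PySem.List.slice chunk none (some (r : Int))],
       acc.2 ++ [PySem.List.slice chunk (some (r : Int)) none]))
    ([], [])
  (String.mk p.1.flatten, String.mk p.2.flatten)

-- ===== PRECONDITION & SPEC =====
def Spec_extract_hash (text : String) (key : String) (out : String × String) : Prop := out = extract_hash_alt text key
instance (text : String) (key : String) (out : String × String) : Decidable (Spec_extract_hash text key out) := by unfold Spec_extract_hash; infer_instance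

-- ===== CLAIM (what is proved, stated in full; the proofs are below) =====
def Claim_equal_extract_hash : Prop := ∀ (text : String) (key : String), Dom_extract_hash text key → Spec_extract_hash text key (extract_hash text key)

-- ===== LEMMAS AND PROOFS =====

theorem pvInnerA_eq (n : Nat) (cs : List Char) : pvInnerA n cs = (cs.take n, cs.drop n) := by
  induction n generalizing cs with
  | zero => simp [pvInnerA]
  | succ n ih =>
    cases cs with
    | nil => simp [pvInnerA]
    | cons c cs => simp [pvInnerA, ih]

-- common chunked form of the de-interleave, as lists of chunks
def pvSpec (r : Nat) : List Char → List (List Char) × List (List Char)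
  | [] => ([], [])
  | c :: cs =>
    let chunk := (c :: cs).take (r + 1)
    let q := pvSpec r (cs.drop r)
    (chunk.take r :: q.1, chunk.drop r :: q.2)
termination_by cs => cs.length
decreasing_by
  simp

theorem pvSpec_cons (r : Nat) (c : Char) (cs : List Char) :
    pvSpec r (c :: cs) =
      (((c :: cs).take (r + 1)).take r :: (pvSpec r (cs.drop r)).1,
       ((c :: cs).take (r + 1)).drop r :: (pvSpec r (cs.drop r)).2) := by
  rw [pvSpec.eq_def]

theorem pyRange_pos_nil (a b s : Int) (hs : 0 < s) (hab : b ≤ a) :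
    PySem.List.pyRange a b s = [] := by
  rw [PySem.List.pyRange_of_pos _ _ hs, if_neg (by omega)]
  simp

theorem pyRange_pos_cons (a b s : Int) (hs : 0 < s) (hab : a < b) :
    PySem.List.pyRange a b s = a :: PySem.List.pyRange (a + s) b s := by
  rw [PySem.List.pyRange_of_pos _ _ hs, PySem.List.pyRange_of_pos _ _ hs, if_pos hab]
  by_cases h2 : a + s < b
  · rw [if_pos h2]
    have hstep : (b - (a + s) + s - 1 + 1 * s) / s = (b - (a + s) + s - 1) / s + 1 :=
      Int.add_mul_ediv_right _ 1 (by omega)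
    have hnum : (b - a + s - 1) / s = (b - (a + s) + s - 1) / s + 1 := by
      have he : b - a + s - 1 = b - (a + s) + s - 1 + 1 * s := by ring
      rw [he, hstep]
    have hq : 0 ≤ (b - (a + s) + s - 1) / s := Int.ediv_nonneg (by omega) (le_of_lt hs)
    have hN : ((b - a + s - 1) / s).toNat = ((b - (a + s) + s - 1) / s).toNat + 1 := by omega
    rw [hN, List.range_succ_eq_map]
    simp [List.map_map]
    intro k _
    ring
  · rw [if_neg h2]
    have hlo : 1 ≤ (b - a + s - 1) / s := by
      rw [Int.le_ediv_iff_mul_le hs]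
      omega
    have hhi : (b - a + s - 1) / s < 2 := by
      rw [Int.ediv_lt_iff_lt_mul hs]
      omega
    have h1 : ((b - a + s - 1) / s).toNat = 1 := by omega
    rw [h1]
    simp [List.range_succ]

theorem pvChunk_eval (full : List Char) (d r : Nat) :
    PySem.List.slice full (some (d : Int)) (some ((d : Int) + ((r : Int) + 1)))
      = (full.drop d).take (r + 1) := by
  have hc1 : (d : Int) + ((r : Int) + 1) = (d : Int) + ((r + 1 : Nat) : Int) := by push_cast; ring
  rw [hc1, PySem.List.slice_natCast_add]

-- B's fold from any start offset d computes pvSpec of the remaining suffix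
theorem pvFoldB (r : Nat) (full : List Char) : ∀ (n : Nat) (d : Nat), full.length - d ≤ n →
    ∀ (ao ae : List (List Char)),
    (PySem.List.pyRange (d : Int) (full.length : Int) ((r : Int) + 1)).foldl
      (fun (acc : List (List Char) × List (List Char)) i =>
        let chunk := PySem.List.slice full (some i) (some (i + ((r : Int) + 1)))
        (acc.1 ++ [PySem.List.slice chunk none (some (r : Int))],
         acc.2 ++ [PySem.List.slice chunk (some (r : Int)) none]))
      (ao, ae)
    = (ao ++ (pvSpec r (full.drop d)).1, ae ++ (pvSpec r (full.drop d)).2) := by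
  intro n
  induction n with
  | zero =>
    intro d hlen ao ae
    have hd : full.length ≤ d := by omega
    rw [pyRange_pos_nil _ _ _ (by omega) (by exact_mod_cast hd)]
    rw [List.drop_eq_nil_of_le hd]
    simp [pvSpec]
  | succ n ih =>
    intro d hlen ao ae
    cases hdrop : full.drop d with
    | nil =>
      have hd : full.length ≤ d := by
        have := congrArg List.length hdrop
        simp at this
        omega
      rw [pyRange_pos_nil _ _ _ (by omega) (by exact_mod_cast hd)]
      simp [pvSpec]
    | cons c cs' =>
      have hd : d < full.length := by
        have := congrArg List.length hdrop
        simp at this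
        omega
      rw [pyRange_pos_cons _ _ _ (by omega) (by exact_mod_cast hd)]
      rw [List.foldl_cons]
      have hinit : (let chunk := PySem.List.slice full (some (d : Int)) (some ((d : Int) + ((r : Int) + 1)))
            ((ao, ae).1 ++ [PySem.List.slice chunk none (some (r : Int))],
             (ao, ae).2 ++ [PySem.List.slice chunk (some (r : Int)) none]))
          = (ao ++ [((c :: cs').take (r + 1)).take r], ae ++ [((c :: cs').take (r + 1)).drop r]) := by
        simp only [pvChunk_eval, PySem.List.slice_to_natCast, PySem.List.slice_from_natCast, hdrop]
      rw [hinit]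
      have hc2 : (d : Int) + ((r : Int) + 1) = ((d + (r + 1) : Nat) : Int) := by push_cast; ring
      rw [hc2]
      rw [ih (d + (r + 1)) (by omega)]
      have hdropEq : full.drop (d + (r + 1)) = cs'.drop r := by
        have h1 : full.drop (d + (r + 1)) = (full.drop d).drop (r + 1) := by
          rw [List.drop_drop]
        rw [h1, hdrop]
        simp
      rw [hdropEq, pvSpec_cons]
      simp

theorem pvLoopA_drop_nil (r : Nat) (c : Char) (cs : List Char)
    (h : (c :: cs).drop r = []) :
    pvLoopA r (c :: cs) = ((c :: cs).take r, []) := by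
  rw [pvLoopA.eq_def]
  simp only [pvInnerA_eq]
  split
  · simp
  · rename_i hc t h2
    rw [pvInnerA_eq] at h2
    simp only [] at h2
    rw [h] at h2
    cases h2

theorem pvLoopA_drop_cons (r : Nat) (c : Char) (cs : List Char) (hc : Char) (t : List Char)
    (h : (c :: cs).drop r = hc :: t) :
    pvLoopA r (c :: cs) = ((c :: cs).take r ++ (pvLoopA r t).1, hc :: (pvLoopA r t).2) := by
  rw [pvLoopA.eq_def]
  simp only [pvInnerA_eq]
  split
  · rename_i h2
    rw [pvInnerA_eq] at h2
    simp only [] at h2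
    rw [h] at h2
    cases h2
  · rename_i hc' t' h2
    rw [pvInnerA_eq] at h2
    simp only [] at h2
    rw [h] at h2
    have he : hc :: t = hc' :: t' := h2
    injection he with he1 he2
    subst he1
    subst he2
    rfl

-- A's loop computes the flattened pvSpec
theorem pvLoopA_eq (r : Nat) : ∀ (n : Nat) (cs : List Char), cs.length ≤ n →
    pvLoopA r cs = ((pvSpec r cs).1.flatten, (pvSpec r cs).2.flatten) := by
  intro n
  induction n with
  | zero =>
    intro cs hlen
    have : cs = [] := List.length_eq_zero_iff.mp (Nat.le_zero.mp hlen)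
    subst this
    simp [pvLoopA, pvSpec]
  | succ n ih =>
    intro cs hlen
    cases hcs : cs with
    | nil => simp [pvLoopA, pvSpec]
    | cons c cs' =>
      subst hcs
      have hlen2 : cs'.length + 1 ≤ n + 1 := by simpa using hlen
      have htk : ((c :: cs').take (r + 1)).take r = (c :: cs').take r := by
        rw [List.take_take]
        simp
      have hdr : ((c :: cs').take (r + 1)).drop r = ((c :: cs').drop r).take 1 := by
        rw [List.drop_take]
        congr 1
        omega
      cases h2 : (c :: cs').drop r with
      | nil =>
        have hnil : cs'.drop r = [] := by
          have hh := congrArg List.length h2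
          simp at hh
          exact List.drop_eq_nil_of_le (by omega)
        rw [pvLoopA_drop_nil r c cs' h2, pvSpec_cons, htk, hdr, h2, hnil]
        simp [pvSpec]
      | cons hc t =>
        have hT : cs'.drop r = t := by
          have h3 : ((c :: cs').drop r).tail = (c :: cs').drop (r + 1) := by
            rw [List.tail_drop]
          rw [h2] at h3
          simpa using h3.symm
        have hlt : t.length ≤ n := by
          have hh := congrArg List.length h2
          simp at hh
          omega
        rw [pvLoopA_drop_cons r c cs' hc t h2, pvSpec_cons, htk, hdr, h2, hT, ih t hlt]
        simp

-- ===== VERDICT (by name: the statement is the Claim_ definition above) =====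
theorem extract_hash_spec : Claim_equal_extract_hash := by
  intro text key _
  unfold Spec_extract_hash extract_hash extract_hash_alt
  have hB := pvFoldB (key.length % 3 + 2) text.toList text.toList.length 0 (by omega) [] []
  have hA := pvLoopA_eq (key.length % 3 + 2) text.toList.length text.toList (le_refl _)
  simp only [Nat.cast_zero, List.drop_zero] at hB
  simp only
  rw [hA, hB]
  simp
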